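-- pv_equiv track=rewrite | github.com/CultureBotAI/MediaIngredientMech | scripts/import_from_culturemech.py | extract_synonyms
-- ===== SOURCE A (Python) =====
-- def extract_synonyms(ingredient: dict) -> list[dict]:
--     """Extract synonyms from a mapped ingredient's synonyms list.
--
--     CultureMech synonyms are role/property descriptions from the raw data.
--     We treat them as RAW_TEXT synonyms.
--     """
--     raw_synonyms = ingredient.get("synonyms", [])
--     if not raw_synonyms:
--         return []
--
--     seen = set()
--     result = []
--     for text in raw_synonyms:
--         text = str(text).strip()
--         if not text or text in seen:
--             continue
--         seen.add(text)
--         result.append(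
--             {
--                 "synonym_text": text,
--                 "synonym_type": "RAW_TEXT",
--                 "source": "CultureMech",
--             }
--         )
--     return result
-- ===== SOURCE B (Python) =====
-- def extract_synonyms(ingredient: dict) -> list[dict]:
--     """Extract synonyms from a mapped ingredient's synonyms list.
--
--     Deduplicates by repeated filtering (filter-nub) instead of a seen-set:
--     take the first remaining text, emit its dict, and delete every other
--     occurrence of it from the remaining worklist.
--     """
--     rest = [s for t in ingredient.get("synonyms", []) if (s := str(t).strip())]
--     result = []
--     while rest:
--         text = rest[0]
--         result.append(
--             {
--                 "synonym_text": text,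
--                 "synonym_type": "RAW_TEXT",
--                 "source": "CultureMech",
--             }
--         )
--         rest = [s for s in rest[1:] if s != text]
--     return result
-- ===== Notes on version B (the rewrite author's own statement) =====
-- stated objective: alternative
-- what changed: Replaces A's seen-set membership test inside one accumulating loop by a filter-based nub: a worklist from which each emitted text's remaining duplicates are deleted by filtering, so no auxiliary seen structure exists.
import Mathlib
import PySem

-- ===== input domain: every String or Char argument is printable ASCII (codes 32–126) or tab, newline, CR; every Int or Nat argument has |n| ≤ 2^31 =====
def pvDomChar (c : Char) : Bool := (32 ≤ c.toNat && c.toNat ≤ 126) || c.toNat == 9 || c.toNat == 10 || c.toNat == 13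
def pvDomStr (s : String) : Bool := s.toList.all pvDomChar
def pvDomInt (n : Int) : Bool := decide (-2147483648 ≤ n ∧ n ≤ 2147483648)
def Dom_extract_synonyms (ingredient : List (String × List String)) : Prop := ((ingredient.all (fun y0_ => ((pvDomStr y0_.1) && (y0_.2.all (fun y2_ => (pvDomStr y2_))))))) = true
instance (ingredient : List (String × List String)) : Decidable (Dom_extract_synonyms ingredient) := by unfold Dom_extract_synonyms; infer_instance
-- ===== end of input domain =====

-- B dedups by repeatedly filtering the worklist (filter-nub, O(n^2)) instead of A's seen-set loop; same return value.

-- the synonym dict built for one text (shared shape of both programs' literal dict)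
def pvWrap (t : String) : List (String × String) :=
  [("synonym_text", t), ("synonym_type", "RAW_TEXT"), ("source", "CultureMech")]

-- ===== PORT A =====
def extract_synonyms (ingredient : List (String × List String)) : List (List (String × String)) :=
  let raw_synonyms := PySem.Dict.getD (PySem.Dict.mk ingredient) "synonyms" []
  if raw_synonyms = [] then []
  else
    (raw_synonyms.foldl
      (fun (st : PySem.Set String × List (List (String × String))) text =>
        let text := PySem.Str.strip text
        if text = "" ∨ PySem.Set.contains st.1 text then st
        else (PySem.Set.add st.1 text, st.2 ++ [pvWrap text]))
      (PySem.Set.empty, [])).2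

-- ===== PORT B =====
-- B's while loop: take the head, emit its dict, delete its duplicates from the worklist
def pvLoopB (rest : List String) (result : List (List (String × String))) :
    List (List (String × String)) :=
  match rest with
  | [] => result
  | text :: rs => pvLoopB (rs.filter (fun s => s ≠ text)) (result ++ [pvWrap text])
termination_by rest.length
decreasing_by
  simp only [List.length_unattach]
  exact Nat.lt_succ_of_le (le_trans (List.length_filter_le _ _) (by simp))

def extract_synonyms_alt (ingredient : List (String × List String)) : List (List (String × String)) :=
  let rest := ((PySem.Dict.getD (PySem.Dict.mk ingredient) "synonyms" []).map
      PySem.Str.strip).filter (fun s => s ≠ "")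
  pvLoopB rest []

-- ===== PRECONDITION & SPEC =====
def Spec_extract_synonyms (ingredient : List (String × List String)) (out : List (List (String × String))) : Prop := out = extract_synonyms_alt ingredient
instance (ingredient : List (String × List String)) (out : List (List (String × String))) : Decidable (Spec_extract_synonyms ingredient out) := by unfold Spec_extract_synonyms; infer_instance

-- ===== CLAIM =====
def Claim_equal_extract_synonyms : Prop := ∀ (ingredient : List (String × List String)), Dom_extract_synonyms ingredient → Spec_extract_synonyms ingredient (extract_synonyms ingredient)

-- ===== LEMMAS AND PROOFS =====

-- filter-nub on plain strings (pvLoopB without the wrapping/accumulator)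
def pvNub (xs : List String) : List String :=
  match xs with
  | [] => []
  | x :: rs => x :: pvNub (rs.filter (fun s => s ≠ x))
termination_by xs.length
decreasing_by
  simp only [List.length_unattach]
  exact Nat.lt_succ_of_le (le_trans (List.length_filter_le _ _) (by simp))

-- the fresh elements that A's loop appends while folding over xs, given the seen set
def pvNewOnes (seen : PySem.Set String) : List String → List String
  | [] => []
  | x :: xs =>
      if PySem.Set.contains seen x then pvNewOnes seen xs
      else x :: pvNewOnes (PySem.Set.add seen x) xs

theorem pvNub_cons (x : String) (rs : List String) :
    pvNub (x :: rs) = x :: pvNub (rs.filter (fun s => s ≠ x)) := by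
  rw [pvNub]

theorem pvLoopB_cons (x : String) (rs : List String) (acc : List (List (String × String))) :
    pvLoopB (x :: rs) acc = pvLoopB (rs.filter (fun s => s ≠ x)) (acc ++ [pvWrap x]) := by
  rw [pvLoopB]

theorem pvLoopB_eq_aux (n : Nat) (xs : List String) (hn : xs.length ≤ n)
    (acc : List (List (String × String))) :
    pvLoopB xs acc = acc ++ (pvNub xs).map pvWrap := by
  induction n generalizing xs acc with
  | zero =>
      have : xs = [] := List.length_eq_zero_iff.mp (Nat.le_zero.mp hn)
      subst this; simp [pvLoopB, pvNub]
  | succ n ih =>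
      cases xs with
      | nil => simp [pvLoopB, pvNub]
      | cons x rs =>
          rw [pvLoopB_cons, pvNub_cons,
            ih _ (le_trans (List.length_filter_le _ _) (Nat.le_of_succ_le_succ hn))]
          simp

theorem pvLoopB_eq (xs : List String) (acc : List (List (String × String))) :
    pvLoopB xs acc = acc ++ (pvNub xs).map pvWrap :=
  pvLoopB_eq_aux xs.length xs le_rfl acc

-- nub of the not-yet-seen elements = the fresh elements A's loop appends
theorem pvNub_eq_newOnes (xs : List String) (s : PySem.Set String) :
    pvNub (xs.filter (fun y => ¬ PySem.Set.contains s y)) = pvNewOnes s xs := by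
  induction xs generalizing s with
  | nil => simp [pvNub, pvNewOnes]
  | cons x rs ih =>
      by_cases h : PySem.Set.contains s x
      · simp only [List.filter_cons, h, not_true_eq_false, decide_false,
          Bool.false_eq_true, if_false]
        rw [ih, pvNewOnes, if_pos h]
      · simp only [List.filter_cons]
        rw [if_pos (by simpa using h)]
        rw [pvNub_cons, pvNewOnes, if_neg h]
        congr 1
        rw [List.filter_filter, ← ih (PySem.Set.add s x)]
        congr 1
        apply List.filter_congr
        intro a _
        simp
        exact Bool.and_comm _ _

-- A's loop, with accumulators peeled off
theorem pvLoopA_eq (raw : List String) (seen : PySem.Set String)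
    (res : List (List (String × String))) :
    (raw.foldl
      (fun (st : PySem.Set String × List (List (String × String))) text =>
        let text := PySem.Str.strip text
        if text = "" ∨ PySem.Set.contains st.1 text then st
        else (PySem.Set.add st.1 text, st.2 ++ [pvWrap text]))
      (seen, res)).2
    = res ++ (pvNewOnes seen ((raw.map PySem.Str.strip).filter (fun s => s ≠ ""))).map pvWrap := by
  induction raw generalizing seen res with
  | nil => simp [pvNewOnes]
  | cons t ts ih =>
      simp only [List.foldl_cons]
      by_cases he : PySem.Str.strip t = ""
      · rw [if_pos (Or.inl he), ih]
        simp [he]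
      · by_cases hc : PySem.Str.strip t ∈ (seen : List String)
        · have hcb : PySem.Set.contains seen (PySem.Str.strip t) = true := by
            simpa using hc
          rw [if_pos (Or.inr hcb), ih]
          simp [he, pvNewOnes, hc]
        · have hcb : ¬ PySem.Set.contains seen (PySem.Str.strip t) = true := by
            simpa using hc
          rw [if_neg (fun h => h.elim he hcb), ih]
          simp [he, pvNewOnes, hc]

-- ===== VERDICT =====
theorem extract_synonyms_spec : Claim_equal_extract_synonyms := by
  intro ingredient _
  unfold Spec_extract_synonyms extract_synonyms extract_synonyms_alt
  set raw := PySem.Dict.getD (PySem.Dict.mk ingredient) "synonyms" [] with hraw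
  by_cases h : raw = []
  · simp [h, pvLoopB]
  · simp only [h, if_false]
    rw [pvLoopA_eq raw PySem.Set.empty [], pvLoopB_eq]
    rw [← pvNub_eq_newOnes _ PySem.Set.empty]
    simp [PySem.Set.empty, PySem.Set.contains]
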